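-- pv_equiv track=rewrite | github.com/fivetran/fivetran_connector_sdk | examples/common_patterns_for_connectors/performance_improvements_with_adaptive_processing/postgres/connector.py | categorize_and_sort_tables
-- ===== SOURCE A (Python) =====
-- from typing import Dict, List, Any, Tuple
--
-- SMALL_TABLE_THRESHOLD = 1000000  # 1M rows
--
-- LARGE_TABLE_THRESHOLD = 50000000  # 50M rows
--
-- def categorize_and_sort_tables(tables: List[str], table_sizes: Dict[str, int]) -> List[Tuple[str, str, int]]:
--     """Categorize tables by size and sort for optimal processing order.
--
--     Returns: List of tuples (table_name, category, row_count)
--     Categories: 'small', 'medium', 'large'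
--     """
--     categorized = []
--
--     for table in tables:
--         row_count = table_sizes.get(table, 0)
--
--         if row_count < SMALL_TABLE_THRESHOLD:
--             category = 'small'
--         elif row_count < LARGE_TABLE_THRESHOLD:
--             category = 'medium'
--         else:
--             category = 'large'
--
--         categorized.append((table, category, row_count))
--
--     # Sort by category (small first, then medium, then large) and by row count within each category
--     categorized.sort(key=lambda x: ('small', 'medium', 'large').index(x[1]) * 1000000000 + x[2])
--
--     return categorized
-- ===== SOURCE B (Python) =====
-- SMALL_TABLE_THRESHOLD = 1000000  # 1M rows
-- LARGE_TABLE_THRESHOLD = 50000000  # 50M rows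
--
--
-- def categorize_and_sort_tables(tables, table_sizes):
--     """Distribute tables into three buckets in one pass, then sort each
--     bucket by row count and concatenate (small, medium, large)."""
--     smalls, mediums, larges = [], [], []
--     for table in tables:
--         row_count = table_sizes.get(table, 0)
--         if row_count < SMALL_TABLE_THRESHOLD:
--             smalls.append((table, 'small', row_count))
--         elif row_count < LARGE_TABLE_THRESHOLD:
--             mediums.append((table, 'medium', row_count))
--         else:
--             larges.append((table, 'large', row_count))
--     smalls.sort(key=lambda x: x[2])
--     mediums.sort(key=lambda x: x[2])
--     larges.sort(key=lambda x: x[2])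
--     return smalls + mediums + larges
-- ===== Notes on version B (the rewrite author's own statement) =====
-- stated objective: alternative
-- what changed: Replaces the single global sort on an arithmetic composite key (bucket index * 1e9 + row count) by a one-pass distribution into three category buckets, each bucket then stably sorted by row count alone and concatenated small++medium++large.
import Mathlib
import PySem

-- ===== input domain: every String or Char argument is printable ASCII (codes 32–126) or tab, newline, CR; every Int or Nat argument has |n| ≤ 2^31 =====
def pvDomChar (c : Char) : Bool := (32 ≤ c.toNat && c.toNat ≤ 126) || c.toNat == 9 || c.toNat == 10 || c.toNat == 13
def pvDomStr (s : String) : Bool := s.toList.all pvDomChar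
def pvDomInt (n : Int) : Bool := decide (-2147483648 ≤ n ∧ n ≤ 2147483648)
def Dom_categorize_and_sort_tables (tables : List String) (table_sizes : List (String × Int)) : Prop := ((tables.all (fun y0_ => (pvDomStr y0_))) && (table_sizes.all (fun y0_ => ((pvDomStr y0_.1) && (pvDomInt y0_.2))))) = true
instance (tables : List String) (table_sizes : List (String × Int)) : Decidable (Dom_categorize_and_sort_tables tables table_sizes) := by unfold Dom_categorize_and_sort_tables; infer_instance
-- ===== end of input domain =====

-- B buckets the tables in one pass and sorts each bucket by row count alone,
-- instead of A's single global sort on the composite key index(category)*10^9 + row_count.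

-- ===== PORT A =====
-- A's sort key lambda: ('small','medium','large').index(x[1]) * 1000000000 + x[2].
-- tuple.index is PySem.List.index?; `.getD 0` stands in for the ValueError, which is
-- unreachable here because the category stored in x.2.1 is always a member of the tuple.
def pvKeyA (x : String × String × Int) : Int :=
  (((PySem.List.index? ["small", "medium", "large"] x.2.1).getD 0 : Nat) : Int) * 1000000000 + x.2.2

def categorize_and_sort_tables (tables : List String) (table_sizes : List (String × Int)) : List (String × String × Int) :=
  let categorized := tables.foldl (fun acc table =>
    let row_count := PySem.Dict.getD (PySem.Dict.mk table_sizes) table 0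
    let category := if row_count < 1000000 then "small"
      else if row_count < 50000000 then "medium"
      else "large"
    acc ++ [(table, category, row_count)]) []
  PySem.List.sorted categorized pvKeyA

-- ===== PORT B =====
def categorize_and_sort_tables_alt (tables : List String) (table_sizes : List (String × Int)) : List (String × String × Int) :=
  let p := tables.foldl (fun (acc : List (String × String × Int) × List (String × String × Int) × List (String × String × Int)) table =>
    let row_count := PySem.Dict.getD (PySem.Dict.mk table_sizes) table 0
    if row_count < 1000000 then (acc.1 ++ [(table, "small", row_count)], acc.2.1, acc.2.2)
    else if row_count < 50000000 then (acc.1, acc.2.1 ++ [(table, "medium", row_count)], acc.2.2)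
    else (acc.1, acc.2.1, acc.2.2 ++ [(table, "large", row_count)])) ([], [], [])
  PySem.List.sorted p.1 (fun x => x.2.2) ++ PySem.List.sorted p.2.1 (fun x => x.2.2)
    ++ PySem.List.sorted p.2.2 (fun x => x.2.2)

-- ===== PRECONDITION & SPEC =====
def Spec_categorize_and_sort_tables (tables : List String) (table_sizes : List (String × Int)) (out : List (String × String × Int)) : Prop := out = categorize_and_sort_tables_alt tables table_sizes
instance (tables : List String) (table_sizes : List (String × Int)) (out : List (String × String × Int)) : Decidable (Spec_categorize_and_sort_tables tables table_sizes out) := by unfold Spec_categorize_and_sort_tables; infer_instance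

-- ===== CLAIM (what is proved, stated in full; the proofs are below) =====
def Claim_equal_categorize_and_sort_tables : Prop := ∀ (tables : List String) (table_sizes : List (String × Int)), Dom_categorize_and_sort_tables tables table_sizes → Spec_categorize_and_sort_tables tables table_sizes (categorize_and_sort_tables tables table_sizes)

-- ===== LEMMAS AND PROOFS =====

/-- The tuple A and B both build for a table. -/
def pvItem (table_sizes : List (String × Int)) (table : String) : String × String × Int :=
  let row_count := PySem.Dict.getD (PySem.Dict.mk table_sizes) table 0
  (table, (if row_count < 1000000 then "small"
    else if row_count < 50000000 then "medium"
    else "large"), row_count)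

def pvSm (x : String × String × Int) : Bool := decide (x.2.2 < 1000000)
def pvMd (x : String × String × Int) : Bool := !pvSm x && decide (x.2.2 < 50000000)
def pvLg (x : String × String × Int) : Bool := !pvSm x && !decide (x.2.2 < 50000000)

def pvWfS (x : String × String × Int) : Prop := x.2.1 = "small" ∧ x.2.2 < 1000000
def pvWfM (x : String × String × Int) : Prop := x.2.1 = "medium" ∧ 1000000 ≤ x.2.2 ∧ x.2.2 < 50000000
def pvWfL (x : String × String × Int) : Prop := x.2.1 = "large" ∧ 50000000 ≤ x.2.2

lemma pvKeyA_wfS {x : String × String × Int} (h : pvWfS x) : pvKeyA x = x.2.2 := by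
  unfold pvKeyA; rw [h.1]
  have : PySem.List.index? ["small", "medium", "large"] "small" = some 0 := by decide
  rw [this]; simp

lemma pvKeyA_wfM {x : String × String × Int} (h : pvWfM x) : pvKeyA x = 1000000000 + x.2.2 := by
  unfold pvKeyA; rw [h.1]
  have : PySem.List.index? ["small", "medium", "large"] "medium" = some 1 := by decide
  rw [this]; simp

lemma pvKeyA_wfL {x : String × String × Int} (h : pvWfL x) : pvKeyA x = 2000000000 + x.2.2 := by
  unfold pvKeyA; rw [h.1]
  have : PySem.List.index? ["small", "medium", "large"] "large" = some 2 := by decide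
  rw [this]; simp

lemma insertBy_append_of_all_before {α : Type} (b : α → α → Bool) (x : α) (ys zs : List α)
    (h : ∀ z ∈ zs, b x z = true) :
    PySem.List.insertBy b x (ys ++ zs) = PySem.List.insertBy b x ys ++ zs := by
  induction ys with
  | nil =>
    cases zs with
    | nil => simp [PySem.List.insertBy]
    | cons z zs => simp [PySem.List.insertBy, h z (by simp)]
  | cons y ys ih =>
    simp only [List.cons_append, PySem.List.insertBy]
    cases hb : b x y <;> simp [ih]

lemma insertBy_append_of_all_not {α : Type} (b : α → α → Bool) (x : α) (ys zs : List α)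
    (h : ∀ y ∈ ys, b x y = false) :
    PySem.List.insertBy b x (ys ++ zs) = ys ++ PySem.List.insertBy b x zs := by
  induction ys with
  | nil => simp
  | cons y ys ih =>
    simp only [List.cons_append, PySem.List.insertBy, h y (by simp)]
    simp [ih (fun y hy => h y (by simp [hy]))]

lemma insertBy_congr {α : Type} (b₁ b₂ : α → α → Bool) (x : α) (ys : List α)
    (h : ∀ y ∈ ys, b₁ x y = b₂ x y) :
    PySem.List.insertBy b₁ x ys = PySem.List.insertBy b₂ x ys := by
  induction ys with
  | nil => rfl
  | cons y ys ih =>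
    simp only [PySem.List.insertBy, h y (by simp)]
    cases hb : b₂ x y <;> simp [ih (fun y hy => h y (by simp [hy]))]

/-- A's comparison function and B's, as insertBy `before` predicates. -/
def pvBA (a b : String × String × Int) : Bool := decide (pvKeyA a < pvKeyA b)
def pvBR (a b : String × String × Int) : Bool := decide (a.2.2 < b.2.2)

lemma step_small {x : String × String × Int} (hx : pvWfS x) (s m l : List (String × String × Int))
    (hs : ∀ y ∈ s, pvWfS y) (hm : ∀ y ∈ m, pvWfM y) (hl : ∀ y ∈ l, pvWfL y) :
    PySem.List.insertBy pvBA x (s ++ (m ++ l)) = PySem.List.insertBy pvBR x s ++ (m ++ l) := by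
  rw [insertBy_append_of_all_before pvBA x s (m ++ l) ?_]
  · congr 1
    apply insertBy_congr
    intro y hy
    simp only [pvBA, pvBR, pvKeyA_wfS hx, pvKeyA_wfS (hs y hy)]
  · intro z hz
    simp only [pvBA, decide_eq_true_eq, pvKeyA_wfS hx]
    rcases List.mem_append.mp hz with h | h
    · rw [pvKeyA_wfM (hm z h)]; have := (hm z h).2.1; have := hx.2; omega
    · rw [pvKeyA_wfL (hl z h)]; have := (hl z h).2; have := hx.2; omega

lemma step_medium {x : String × String × Int} (hx : pvWfM x) (s m l : List (String × String × Int))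
    (hs : ∀ y ∈ s, pvWfS y) (hm : ∀ y ∈ m, pvWfM y) (hl : ∀ y ∈ l, pvWfL y) :
    PySem.List.insertBy pvBA x (s ++ (m ++ l)) = s ++ (PySem.List.insertBy pvBR x m ++ l) := by
  rw [insertBy_append_of_all_not pvBA x s (m ++ l) ?_]
  · congr 1
    rw [insertBy_append_of_all_before pvBA x m l ?_]
    · congr 1
      apply insertBy_congr
      intro y hy
      simp only [pvBA, pvBR, pvKeyA_wfM hx, pvKeyA_wfM (hm y hy)]
      simp only [decide_eq_decide]; omega
    · intro z hz
      simp only [pvBA, decide_eq_true_eq, pvKeyA_wfM hx, pvKeyA_wfL (hl z hz)]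
      have := (hl z hz).2; have := hx.2.2; omega
  · intro y hy
    simp only [pvBA, decide_eq_false_iff_not, pvKeyA_wfM hx, pvKeyA_wfS (hs y hy)]
    have := (hs y hy).2; have := hx.2.1; omega

lemma step_large {x : String × String × Int} (hx : pvWfL x) (s m l : List (String × String × Int))
    (hs : ∀ y ∈ s, pvWfS y) (hm : ∀ y ∈ m, pvWfM y) (hl : ∀ y ∈ l, pvWfL y) :
    PySem.List.insertBy pvBA x (s ++ (m ++ l)) = s ++ (m ++ PySem.List.insertBy pvBR x l) := by
  rw [insertBy_append_of_all_not pvBA x s (m ++ l) ?_]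
  · congr 1
    rw [insertBy_append_of_all_not pvBA x m l ?_]
    · congr 1
      apply insertBy_congr
      intro y hy
      simp only [pvBA, pvBR, pvKeyA_wfL hx, pvKeyA_wfL (hl y hy)]
      simp only [decide_eq_decide]; omega
    · intro y hy
      simp only [pvBA, decide_eq_false_iff_not, pvKeyA_wfL hx, pvKeyA_wfM (hm y hy)]
      have := (hm y hy).2.2; have := hx.2; omega
  · intro y hy
    simp only [pvBA, decide_eq_false_iff_not, pvKeyA_wfL hx, pvKeyA_wfS (hs y hy)]
    have := (hs y hy).2; have := hx.2; omega

/-- Main invariant: the insertion-sort fold with A's composite key over well-formed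
items, started from three well-formed sorted segments, splits into per-bucket folds. -/
lemma sortfold (xs : List (String × String × Int))
    (hxs : ∀ x ∈ xs, pvWfS x ∨ pvWfM x ∨ pvWfL x) :
    ∀ s m l : List (String × String × Int),
      (∀ y ∈ s, pvWfS y) → (∀ y ∈ m, pvWfM y) → (∀ y ∈ l, pvWfL y) →
      xs.foldl (fun acc x => PySem.List.insertBy pvBA x acc) (s ++ (m ++ l))
      = (xs.filter pvSm).foldl (fun acc x => PySem.List.insertBy pvBR x acc) s
        ++ ((xs.filter pvMd).foldl (fun acc x => PySem.List.insertBy pvBR x acc) m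
        ++ (xs.filter pvLg).foldl (fun acc x => PySem.List.insertBy pvBR x acc) l) := by
  induction xs with
  | nil => intro s m l _ _ _; simp
  | cons x xs ih =>
    intro s m l hs hm hl
    have hxs' : ∀ y ∈ xs, pvWfS y ∨ pvWfM y ∨ pvWfL y := fun y hy => hxs y (by simp [hy])
    simp only [List.foldl_cons, List.filter_cons]
    rcases hxs x (by simp) with h | h | h
    · have hSm : pvSm x = true := by simp only [pvSm, decide_eq_true_eq]; exact h.2
      have hMd : pvMd x = false := by simp [pvMd, hSm]
      have hLg : pvLg x = false := by simp [pvLg, hSm]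
      rw [step_small h s m l hs hm hl, hSm, hMd, hLg]
      simp only [if_true, List.foldl_cons]
      exact ih hxs' _ m l
        (fun y hy => by rcases (PySem.List.mem_insertBy _ _ _ _).mp hy with h' | h'
                        · exact h' ▸ h
                        · exact hs y h') hm hl
    · have hSm : pvSm x = false := by
        simp only [pvSm, decide_eq_false_iff_not]; have := h.2.1; omega
      have hMd : pvMd x = true := by
        simp only [pvMd, hSm, Bool.not_false, Bool.true_and, decide_eq_true_eq]; exact h.2.2
      have hLg : pvLg x = false := by simp [pvLg, hSm]; have := h.2.2; omega
      rw [step_medium h s m l hs hm hl, hSm, hMd, hLg]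
      simp only [if_true, List.foldl_cons]
      exact ih hxs' s _ l hs
        (fun y hy => by rcases (PySem.List.mem_insertBy _ _ _ _).mp hy with h' | h'
                        · exact h' ▸ h
                        · exact hm y h') hl
    · have hSm : pvSm x = false := by
        simp only [pvSm, decide_eq_false_iff_not]; have := h.2; omega
      have hMd : pvMd x = false := by
        simp only [pvMd, hSm, Bool.not_false, Bool.true_and, decide_eq_false_iff_not]
        have := h.2; omega
      have hLg : pvLg x = true := by
        simp only [pvLg, hSm, Bool.not_false, Bool.true_and, Bool.not_eq_eq_eq_not,
          Bool.not_true, decide_eq_false_iff_not]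
        have := h.2; omega
      rw [step_large h s m l hs hm hl, hSm, hMd, hLg]
      simp only [if_true, List.foldl_cons]
      exact ih hxs' s m _ hs hm
        (fun y hy => by rcases (PySem.List.mem_insertBy _ _ _ _).mp hy with h' | h'
                        · exact h' ▸ h
                        · exact hl y h')

/-- B's bucket-distribution fold computes the three filters of the mapped list. -/
lemma partfold (tables : List String) (ts : List (String × Int)) :
    ∀ s m l : List (String × String × Int),
      tables.foldl (fun acc table =>
        let row_count := PySem.Dict.getD (PySem.Dict.mk ts) table 0
        if row_count < 1000000 then (acc.1 ++ [(table, "small", row_count)], acc.2.1, acc.2.2)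
        else if row_count < 50000000 then (acc.1, acc.2.1 ++ [(table, "medium", row_count)], acc.2.2)
        else (acc.1, acc.2.1, acc.2.2 ++ [(table, "large", row_count)])) (s, m, l)
      = (s ++ (tables.map (pvItem ts)).filter pvSm,
         m ++ (tables.map (pvItem ts)).filter pvMd,
         l ++ (tables.map (pvItem ts)).filter pvLg) := by
  induction tables with
  | nil => intro s m l; simp
  | cons t tables ih =>
    intro s m l
    simp only [List.foldl_cons, List.map_cons, List.filter_cons]
    by_cases h1 : PySem.Dict.getD (PySem.Dict.mk ts) t 0 < 1000000
    · rw [if_pos h1, ih]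
      have e : pvItem ts t = (t, "small", PySem.Dict.getD (PySem.Dict.mk ts) t 0) := by
        simp [pvItem, h1]
      simp [e, pvSm, pvMd, pvLg, h1]
    · rw [if_neg h1]
      by_cases h2 : PySem.Dict.getD (PySem.Dict.mk ts) t 0 < 50000000
      · rw [if_pos h2, ih]
        have e : pvItem ts t = (t, "medium", PySem.Dict.getD (PySem.Dict.mk ts) t 0) := by
          simp [pvItem, h1, h2]
        simp [e, pvSm, pvMd, pvLg, h1, h2]
      · rw [if_neg h2, ih]
        have e : pvItem ts t = (t, "large", PySem.Dict.getD (PySem.Dict.mk ts) t 0) := by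
          simp [pvItem, h1, h2]
        simp [e, pvSm, pvMd, pvLg, h1, h2]

lemma wf_item (ts : List (String × Int)) (t : String) :
    pvWfS (pvItem ts t) ∨ pvWfM (pvItem ts t) ∨ pvWfL (pvItem ts t) := by
  unfold pvItem pvWfS pvWfM pvWfL
  by_cases h1 : PySem.Dict.getD (PySem.Dict.mk ts) t 0 < 1000000
  · left; simp [h1]
  · by_cases h2 : PySem.Dict.getD (PySem.Dict.mk ts) t 0 < 50000000
    · right; left; simp [h1, h2]; omega
    · right; right; simp [h1, h2]; omega

-- ===== VERDICT (by name: the statement is the Claim_ definition above) =====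
theorem categorize_and_sort_tables_spec : Claim_equal_categorize_and_sort_tables := by
  intro tables ts _
  unfold Spec_categorize_and_sort_tables
  have hwf : ∀ x ∈ tables.map (pvItem ts), pvWfS x ∨ pvWfM x ∨ pvWfL x := by
    intro x hx; rcases List.mem_map.mp hx with ⟨t, _, rfl⟩; exact wf_item ts t
  have hA : categorize_and_sort_tables tables ts
      = PySem.List.sorted (tables.map (pvItem ts)) pvKeyA := by
    show PySem.List.sorted (tables.foldl (fun acc table => acc ++ [pvItem ts table]) []) pvKeyA = _
    rw [PySem.List.foldl_append_singleton_eq_map]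
    simp
  have hB : categorize_and_sort_tables_alt tables ts
      = PySem.List.sorted ((tables.map (pvItem ts)).filter pvSm) (fun x => x.2.2)
        ++ (PySem.List.sorted ((tables.map (pvItem ts)).filter pvMd) (fun x => x.2.2)
        ++ PySem.List.sorted ((tables.map (pvItem ts)).filter pvLg) (fun x => x.2.2)) := by
    simp only [categorize_and_sort_tables_alt]
    rw [partfold tables ts [] [] []]
    simp
  rw [hA, hB]
  rw [PySem.List.sorted_eq_foldl_insertBy, PySem.List.sorted_eq_foldl_insertBy,
    PySem.List.sorted_eq_foldl_insertBy, PySem.List.sorted_eq_foldl_insertBy]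
  exact sortfold _ hwf [] [] [] (by simp) (by simp) (by simp)
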